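-- pv_equiv track=rewrite | github.com/Kangsan-Jeon/AlgorithmTrain | SW_ExpertAcademy/[완]2383_점심 식사시간.py | makeCase
-- ===== SOURCE A (Python) =====
-- def appendCase(case, d1, d2):
--     n = len(case)
--     new_case = []
--     for i in range(n):
--         s1, s2 = case[i]
--         new_s1 = s1 + [d1]
--         new_s2 = s2 + [d2]
--         new_case.append((new_s1, s2))
--         new_case.append((s1, new_s2))
--     return new_case
--
-- def makeCase(people, stairs):
--     p_y, p_x = people[0]
--     s1_y, s1_x = stairs[0]
--     s2_y, s2_x = stairs[1]
--     # case = [[(stair1을 이용하는 사람이 계단을 내려갈 수 있는 시간), (stair2를 이용하는 사람이 계단을 내려갈 수 있는 시간)], ...]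
--     case = [([abs(p_y - s1_y) + abs(p_x - s1_x) + 1], []),
--             ([], [abs(p_y - s2_y) + abs(p_x - s2_x) + 1])]
--     for i in range(1, len(people)):
--         p_y, p_x = people[i]
--         d1 = abs(p_y - s1_y) + abs(p_x - s1_x) + 1
--         d2 = abs(p_y - s2_y) + abs(p_x - s2_x) + 1
--         case = appendCase(case, d1, d2)
--     return case
-- ===== SOURCE B (Python) =====
-- def makeCase(people, stairs):
--     s1_y, s1_x = stairs[0]
--     s2_y, s2_x = stairs[1]
--     ds = [(abs(p_y - s1_y) + abs(p_x - s1_x) + 1, abs(p_y - s2_y) + abs(p_x - s2_x) + 1)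
--           for p_y, p_x in people]
--     n = len(people)
--     res = []
--     for k in range(2 ** n):
--         l1, l2 = [], []
--         for i in range(n):
--             if (k >> (n - 1 - i)) & 1 == 0:
--                 l1.append(ds[i][0])
--             else:
--                 l2.append(ds[i][1])
--         res.append((l1, l2))
--     return res
-- ===== Notes on version B (the rewrite author's own statement) =====
-- stated objective: alternative
-- what changed: Replaces A's iterative case-list doubling (each pass rebuilds and splits every partial case) with direct bit enumeration: precompute per-person distance pairs once, then for each k in range(2**n) decode the assignment from k's bits (person 0 = MSB, stair1 = bit 0) and build the two lists in one pass.
import Mathlib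
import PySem

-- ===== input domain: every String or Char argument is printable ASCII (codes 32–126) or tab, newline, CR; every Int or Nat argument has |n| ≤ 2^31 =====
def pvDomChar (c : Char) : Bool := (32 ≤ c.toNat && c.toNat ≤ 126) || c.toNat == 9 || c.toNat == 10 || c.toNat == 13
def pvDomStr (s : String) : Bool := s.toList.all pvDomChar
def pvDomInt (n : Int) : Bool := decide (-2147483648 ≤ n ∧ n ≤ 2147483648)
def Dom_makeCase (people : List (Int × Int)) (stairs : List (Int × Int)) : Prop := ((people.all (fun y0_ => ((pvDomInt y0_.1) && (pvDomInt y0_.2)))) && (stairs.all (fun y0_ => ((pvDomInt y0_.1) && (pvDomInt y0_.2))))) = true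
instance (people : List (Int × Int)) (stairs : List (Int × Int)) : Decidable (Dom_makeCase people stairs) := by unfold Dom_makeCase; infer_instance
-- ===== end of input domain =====

-- B replaces A's iterative case-list doubling with direct bit enumeration of the 2^n
-- assignments (person 0 = MSB, stair1 = bit 0); alternative decomposition, same cost.

-- ===== PORT A =====
def appendCase (case : List (List Int × List Int)) (d1 d2 : Int) : List (List Int × List Int) :=
  case.foldl (fun acc p => acc ++ [(p.1 ++ [d1], p.2), (p.1, p.2 ++ [d2])]) []

def makeCase (people : List (Int × Int)) (stairs : List (Int × Int)) : List (List Int × List Int) :=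
  match people, stairs with
  | (p_y, p_x) :: rest, (s1_y, s1_x) :: (s2_y, s2_x) :: _ =>
      let case0 : List (List Int × List Int) :=
        [([|p_y - s1_y| + |p_x - s1_x| + 1], []), ([], [|p_y - s2_y| + |p_x - s2_x| + 1])]
      rest.foldl (fun case p =>
        appendCase case (|p.1 - s1_y| + |p.2 - s1_x| + 1) (|p.1 - s2_y| + |p.2 - s2_x| + 1)) case0
  | _, _ => []   -- people[0]/stairs[0]/stairs[1] would raise IndexError; excluded by Pre_makeCase

-- ===== PORT B =====
def makeCase_alt (people : List (Int × Int)) (stairs : List (Int × Int)) : List (List Int × List Int) :=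
  if 2 ≤ stairs.length then
    let s1 := stairs.getD 0 (0, 0)
    let s2 := stairs.getD 1 (0, 0)
    let ds := people.map (fun p =>
      (|p.1 - s1.1| + |p.2 - s1.2| + 1, |p.1 - s2.1| + |p.2 - s2.2| + 1))
    let n := people.length
    (List.range (2 ^ n)).map (fun k =>
      (List.range n).foldl (fun (p : List Int × List Int) i =>
        if (k >>> (n - 1 - i)) % 2 == 0 then (p.1 ++ [(ds.getD i (0, 0)).1], p.2)
        else (p.1, p.2 ++ [(ds.getD i (0, 0)).2])) ([], []))
  else []   -- stairs[0]/stairs[1] would raise IndexError; excluded by Pre_makeCase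

-- ===== PRECONDITION & SPEC =====
-- Pre_ excludes exactly the inputs where A raises IndexError: empty people or fewer than two stairs.
def Pre_makeCase (people : List (Int × Int)) (stairs : List (Int × Int)) : Prop :=
  people ≠ [] ∧ 2 ≤ stairs.length
instance (people : List (Int × Int)) (stairs : List (Int × Int)) : Decidable (Pre_makeCase people stairs) := by unfold Pre_makeCase; infer_instance
def pvWitness_makeCase : (List (Int × Int)) × (List (Int × Int)) := ([(0, 0)], [(0, 0), (1, 1)])

def Spec_makeCase (people : List (Int × Int)) (stairs : List (Int × Int)) (out : List (List Int × List Int)) : Prop := out = makeCase_alt people stairs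
instance (people : List (Int × Int)) (stairs : List (Int × Int)) (out : List (List Int × List Int)) : Decidable (Spec_makeCase people stairs out) := by unfold Spec_makeCase; infer_instance

-- ===== CLAIM (what is proved, stated in full; the proofs are below) =====
def Claim_equal_makeCase : Prop := ∀ (people : List (Int × Int)) (stairs : List (Int × Int)), Dom_makeCase people stairs → Pre_makeCase people stairs → Spec_makeCase people stairs (makeCase people stairs)
-- ===== LEMMAS AND PROOFS =====

-- One row of B: assignment decoded from k's bits over the first n persons of ds.
def rowB (ds : List (Int × Int)) (n k : Nat) : List Int × List Int :=
  (List.range n).foldl (fun (p : List Int × List Int) i =>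
    if (k >>> (n - 1 - i)) % 2 == 0 then (p.1 ++ [(ds.getD i (0, 0)).1], p.2)
    else (p.1, p.2 ++ [(ds.getD i (0, 0)).2])) ([], [])

theorem appendCase_eq (c : List (List Int × List Int)) (d1 d2 : Int) :
    appendCase c d1 d2 = c.flatMap (fun p => [(p.1 ++ [d1], p.2), (p.1, p.2 ++ [d2])]) := by
  simpa [appendCase] using
    PySem.List.foldl_append_eq_flatMap (l := c) (acc := [])
      (g := fun p => [(p.1 ++ [d1], p.2), (p.1, p.2 ++ [d2])])

theorem range_two_mul_map {α : Type} (m : Nat) (f : Nat → α) :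
    (List.range (2 * m)).map f = (List.range m).flatMap (fun j => [f (2 * j), f (2 * j + 1)]) := by
  induction m with
  | zero => simp
  | succ m ih =>
      have h1 : 2 * (m + 1) = (2 * m + 1) + 1 := by omega
      rw [h1, List.range_succ, List.range_succ, List.range_succ]
      simp [ih]

theorem rowB_append (ds : List (Int × Int)) (d : Int × Int) (k : Nat) :
    rowB (ds ++ [d]) (ds.length + 1) k =
      (fun r : List Int × List Int =>
        if k % 2 == 0 then (r.1 ++ [d.1], r.2) else (r.1, r.2 ++ [d.2])) (rowB ds ds.length (k >>> 1)) := by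
  set n := ds.length with hn
  unfold rowB
  rw [List.range_succ, List.foldl_append]
  have hlast : (ds ++ [d]).getD n (0, 0) = d := by
    simp [List.getD, hn]
  have hpref :
      (List.range n).foldl (fun (p : List Int × List Int) i =>
          if (k >>> (n + 1 - 1 - i)) % 2 == 0 then (p.1 ++ [((ds ++ [d]).getD i (0, 0)).1], p.2)
          else (p.1, p.2 ++ [((ds ++ [d]).getD i (0, 0)).2])) ([], []) =
      (List.range n).foldl (fun (p : List Int × List Int) i =>
          if ((k >>> 1) >>> (n - 1 - i)) % 2 == 0 then (p.1 ++ [(ds.getD i (0, 0)).1], p.2)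
          else (p.1, p.2 ++ [(ds.getD i (0, 0)).2])) ([], []) := by
    refine PySem.List.foldl_congr_mem _ _ _ _ ?_
    intro acc i hi
    have hi' : i < n := List.mem_range.mp hi
    have hget : (ds ++ [d]).getD i (0, 0) = ds.getD i (0, 0) := by
      simp [List.getD, List.getElem?_append_left (by omega : i < ds.length)]
    have hsh : k >>> (n + 1 - 1 - i) = (k >>> 1) >>> (n - 1 - i) := by
      rw [← Nat.shiftRight_add]
      congr 1
      omega
    rw [hget, hsh]
  rw [hpref]
  simp only [List.foldl_cons, List.foldl_nil]
  rw [hlast]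
  simp

theorem fold_eq_enum (ds : List (Int × Int)) :
    ds.foldl (fun c d => appendCase c d.1 d.2) [([], [])] =
      (List.range (2 ^ ds.length)).map (fun k => rowB ds ds.length k) := by
  induction ds using List.reverseRecOn with
  | nil => simp [rowB]
  | append_singleton ds d ih =>
      rw [List.foldl_append]
      simp only [List.foldl_cons, List.foldl_nil]
      rw [ih, appendCase_eq]
      have hlen : (ds ++ [d]).length = ds.length + 1 := by simp
      rw [hlen]
      have hpow : (2 : Nat) ^ (ds.length + 1) = 2 * 2 ^ ds.length := by ring
      rw [hpow, range_two_mul_map]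
      rw [List.flatMap_def, List.map_map, ← List.flatMap_def]
      have h0 : ∀ j, rowB (ds ++ [d]) (ds.length + 1) (2 * j) =
          ((rowB ds ds.length j).1 ++ [d.1], (rowB ds ds.length j).2) := by
        intro j
        rw [rowB_append]
        have hs : (2 * j) >>> 1 = j := by rw [Nat.shiftRight_one]; omega
        have h2 : (2 * j) % 2 = 0 := by omega
        simp [hs, h2]
      have h1 : ∀ j, rowB (ds ++ [d]) (ds.length + 1) (2 * j + 1) =
          ((rowB ds ds.length j).1, (rowB ds ds.length j).2 ++ [d.2]) := by
        intro j
        rw [rowB_append]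
        have hs : (2 * j + 1) >>> 1 = j := by rw [Nat.shiftRight_one]; omega
        have h2 : (2 * j + 1) % 2 = 1 := by omega
        simp [hs, h2]
      congr 1
      funext j
      simp [Function.comp, h0, h1]

-- ===== VERDICT (by name: the statement is the Claim_ definition above) =====
theorem makeCase_spec : Claim_equal_makeCase := by
  intro people stairs _hdom hpre
  obtain ⟨hp, hs⟩ := hpre
  match people, stairs with
  | (p_y, p_x) :: rest, (s1_y, s1_x) :: (s2_y, s2_x) :: srest =>
    show makeCase _ _ = makeCase_alt _ _
    have hA : makeCase ((p_y, p_x) :: rest) ((s1_y, s1_x) :: (s2_y, s2_x) :: srest) =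
        (((p_y, p_x) :: rest).map (fun p : Int × Int =>
            (|p.1 - s1_y| + |p.2 - s1_x| + 1, |p.1 - s2_y| + |p.2 - s2_x| + 1))).foldl
          (fun c d => appendCase c d.1 d.2) [([], [])] := by
      simp only [makeCase, List.map_cons, List.foldl_cons, List.foldl_map]
      rw [appendCase_eq]
      simp
    rw [hA, fold_eq_enum]
    simp only [makeCase_alt, List.getD_cons_zero, List.getD_cons_succ,
      List.length_map, List.length_cons]
    rw [if_pos (show 2 ≤ srest.length + 1 + 1 by omega)]
    rfl
  | [], _ :: _ :: _ => exact absurd rfl hp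
  | _, [] => simp at hs
  | _, [_] => simp at hs
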